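-- pv_equiv track=rewrite | github.com/tobypullan/CoTUncertainty | CoT_filler.py | make_filler_text
-- ===== SOURCE A (Python) =====
-- def make_filler_text(token: str, count: int, wrap: int) -> str:
--     if count <= 0:
--         return ""
--     tokens = [token] * count
--     if wrap <= 0:
--         return " ".join(tokens)
--     lines = []
--     for i in range(0, count, wrap):
--         lines.append(" ".join(tokens[i:i + wrap]))
--     return "\n".join(lines)
-- ===== SOURCE B (Python) =====
-- def make_filler_text(token: str, count: int, wrap: int) -> str:
--     if count <= 0:
--         return ""
--     if wrap <= 0:
--         return " ".join([token] * count)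
--     num_full, rem = divmod(count, wrap)
--     lines = [" ".join([token] * wrap)] * num_full if num_full else []
--     if rem:
--         lines.append(" ".join([token] * rem))
--     return "\n".join(lines)
-- ===== Notes on version B (the rewrite author's own statement) =====
-- stated objective: simpler
-- what changed: Replaces the loop of per-chunk list slices with a closed-form divmod: one full line is built once and replicated count//wrap times, plus a remainder line when count%wrap > 0.
import Mathlib
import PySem

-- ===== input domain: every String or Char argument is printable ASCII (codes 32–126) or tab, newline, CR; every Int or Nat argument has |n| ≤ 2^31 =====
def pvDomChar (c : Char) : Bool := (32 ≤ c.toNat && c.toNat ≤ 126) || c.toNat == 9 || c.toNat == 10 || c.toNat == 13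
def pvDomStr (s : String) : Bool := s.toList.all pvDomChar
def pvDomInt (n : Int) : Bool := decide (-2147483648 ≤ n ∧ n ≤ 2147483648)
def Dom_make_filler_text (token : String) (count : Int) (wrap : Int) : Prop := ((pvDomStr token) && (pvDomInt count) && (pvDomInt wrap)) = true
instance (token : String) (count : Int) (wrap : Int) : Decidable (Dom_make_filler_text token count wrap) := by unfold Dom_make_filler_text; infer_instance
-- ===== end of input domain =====

-- B replaces A's per-chunk slicing loop by a closed-form divmod: one full line replicated
-- count//wrap times plus an optional remainder line (objective: simpler).

-- ===== PORT A =====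
def make_filler_text (token : String) (count : Int) (wrap : Int) : String :=
  if count ≤ 0 then "" else
  let tokens := List.replicate count.toNat token
  if wrap ≤ 0 then PySem.Str.join " " tokens else
  let lines := (PySem.List.pyRange 0 count wrap).foldl
    (fun lines i =>
      lines ++ [PySem.Str.join " " (PySem.List.slice tokens (some i) (some (i + wrap)))]) []
  PySem.Str.join "\n" lines

-- ===== PORT B =====
def make_filler_text_alt (token : String) (count : Int) (wrap : Int) : String :=
  if count ≤ 0 then "" else
  if wrap ≤ 0 then PySem.Str.join " " (List.replicate count.toNat token) else
  let numFull := PySem.Int.floordiv count wrap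
  let rem := PySem.Int.mod count wrap
  let lines := if numFull ≠ 0 then
      List.replicate numFull.toNat (PySem.Str.join " " (List.replicate wrap.toNat token)) else []
  let lines := if rem ≠ 0 then lines ++ [PySem.Str.join " " (List.replicate rem.toNat token)] else lines
  PySem.Str.join "\n" lines

-- ===== PRECONDITION & SPEC =====
def Spec_make_filler_text (token : String) (count : Int) (wrap : Int) (out : String) : Prop := out = make_filler_text_alt token count wrap
instance (token : String) (count : Int) (wrap : Int) (out : String) : Decidable (Spec_make_filler_text token count wrap out) := by unfold Spec_make_filler_text; infer_instance

-- ===== CLAIM (what is proved, stated in full; the proofs are below) =====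
def Claim_equal_make_filler_text : Prop := ∀ (token : String) (count : Int) (wrap : Int), Dom_make_filler_text token count wrap → Spec_make_filler_text token count wrap (make_filler_text token count wrap)

-- ===== LEMMAS AND PROOFS =====

-- append-to-accumulator foldl is a map
theorem pv_foldl_push {α β : Type} (f : α → β) (l : List α) (acc : List β) :
    l.foldl (fun a i => a ++ [f i]) acc = acc ++ l.map f := by
  induction l generalizing acc with
  | nil => simp
  | cons x xs ih => simp [List.foldl_cons, ih]

theorem pv_map_range_const {β : Type} (f : Nat → β) (m : Nat) (c : β)
    (h : ∀ k, k < m → f k = c) : (List.range m).map f = List.replicate m c := by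
  induction m with
  | zero => simp
  | succ m ih =>
      rw [List.range_succ, List.map_append, ih (fun k hk => h k (Nat.lt_succ_of_lt hk)),
        List.replicate_succ']
      simp [h m (Nat.lt_succ_self m)]

-- the chunk at offset w*k of [token]*n has size min w (n - w*k)
theorem pv_slice_chunk (token : String) (n w k : Nat) :
    PySem.List.slice (List.replicate n token) (some ((0 : Int) + (w : Int) * (k : Nat)))
      (some ((0 : Int) + (w : Int) * (k : Nat) + (w : Int)))
    = List.replicate (min w (n - w * k)) token := by
  have h1 : (0 : Int) + (w : Int) * (k : Nat) = ((w * k : Nat) : Int) := by push_cast; ring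
  have h2 : ((w * k : Nat) : Int) + (w : Int) = ((w * k + w : Nat) : Int) := by push_cast; ring
  rw [h1, h2, PySem.List.slice_toNat _ (by positivity) (by positivity),
    Int.toNat_natCast, Int.toNat_natCast, List.drop_replicate, List.take_replicate]
  congr 1
  omega

-- ceiling count of chunks in terms of quotient and remainder
theorem pv_chunks_eq (n w : Nat) (hw : 0 < w) :
    (n + w - 1) / w = n / w + (if n % w ≠ 0 then 1 else 0) := by
  have hdm := Nat.div_add_mod n w
  have hlt : n % w < w := Nat.mod_lt _ hw
  by_cases hr : n % w = 0
  · rw [if_neg (by simp [hr])]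
    have h1 : n + w - 1 = w * (n / w) + (w - 1) := by omega
    have h2 : (w - 1) / w = 0 := Nat.div_eq_of_lt (by omega)
    rw [h1, Nat.mul_add_div hw, h2]
  · rw [if_pos hr]
    have hmul : w * (n / w + 1) = w * (n / w) + w := by ring
    have h1 : n + w - 1 = w * (n / w + 1) + (n % w - 1) := by omega
    have h2 : (n % w - 1) / w = 0 := Nat.div_eq_of_lt (by omega)
    rw [h1, Nat.mul_add_div hw, h2]

-- the loop's line list equals B's replicated-line list
theorem pv_lines_eq (token : String) (n w : Nat) (hw : 0 < w) :
    ((PySem.List.pyRange 0 (n : Int) (w : Int)).foldl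
      (fun lines i =>
        lines ++ [PySem.Str.join " " (PySem.List.slice (List.replicate n token) (some i) (some (i + (w : Int))))]) [])
    = List.replicate (n / w) (PySem.Str.join " " (List.replicate w token))
      ++ (if n % w ≠ 0 then [PySem.Str.join " " (List.replicate (n % w) token)] else []) := by
  rw [pv_foldl_push, List.nil_append,
    PySem.List.pyRange_of_pos 0 (n : Int) (by exact_mod_cast hw), List.map_map]
  have hm : (if (0 : Int) < (n : Int) then (((n : Int) - 0 + (w : Int) - 1) / (w : Int)).toNat else 0)
      = n / w + (if n % w ≠ 0 then 1 else 0) := by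
    by_cases hn : 0 < n
    · rw [if_pos (by exact_mod_cast hn)]
      have h1 : ((n : Int) - 0 + (w : Int) - 1) = ((n + w - 1 : Nat) : Int) := by
        push_cast [Nat.cast_sub (by omega : 1 ≤ n + w)]
        ring
      rw [h1, ← Int.natCast_div, Int.toNat_natCast, pv_chunks_eq n w hw]
    · have h0 : n = 0 := by omega
      subst h0
      rw [if_neg (by simp)]
      simp
  rw [hm]
  have hdm := Nat.div_add_mod n w
  have hlt : n % w < w := Nat.mod_lt _ hw
  have hfull : ∀ k, k < n / w →
      ((fun i => PySem.Str.join " " (PySem.List.slice (List.replicate n token) (some i) (some (i + (w : Int))))) ∘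
        fun k : Nat => (0 : Int) + (w : Int) * (k : Nat)) k
      = PySem.Str.join " " (List.replicate w token) := by
    intro k hk
    simp only [Function.comp_apply]
    rw [pv_slice_chunk]
    have h2 : w * (k + 1) ≤ w * (n / w) := Nat.mul_le_mul_left w (by omega)
    have h3 : w * (k + 1) = w * k + w := by ring
    have h4 : min w (n - w * k) = w := by omega
    rw [h4]
  by_cases hr : n % w = 0
  · rw [if_neg (by simp [hr]), if_neg (by simp [hr]), List.append_nil, Nat.add_zero]
    exact pv_map_range_const _ _ _ hfull
  · rw [if_pos hr, if_pos hr, List.range_succ, List.map_append]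
    congr 1
    · exact pv_map_range_const _ _ _ hfull
    · simp only [List.map_cons, List.map_nil, Function.comp_apply]
      rw [pv_slice_chunk]
      have h2 : min w (n - w * (n / w)) = n % w := by omega
      rw [h2]

-- ===== VERDICT (by name: the statement is the Claim_ definition above) =====
theorem make_filler_text_spec : Claim_equal_make_filler_text := by
  intro token count wrap _
  unfold Spec_make_filler_text
  by_cases hc : count ≤ 0
  · simp [make_filler_text, make_filler_text_alt, hc]
  · by_cases hwle : wrap ≤ 0
    · simp [make_filler_text, make_filler_text_alt, hc, hwle]
    · obtain ⟨n, hn⟩ : ∃ n : Nat, count = (n : Int) :=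
        ⟨count.toNat, (Int.toNat_of_nonneg (by omega)).symm⟩
      obtain ⟨w, hw⟩ : ∃ w : Nat, wrap = (w : Int) :=
        ⟨wrap.toNat, (Int.toNat_of_nonneg (by omega)).symm⟩
      subst hn hw
      have hwpos : 0 < w := by omega
      have hfd : PySem.Int.floordiv (n : Int) (w : Int) = ((n / w : Nat) : Int) := by
        unfold PySem.Int.floordiv
        rw [Int.fdiv_eq_ediv, if_pos (Or.inl (by positivity)), sub_zero, ← Int.natCast_div]
      have hfm : PySem.Int.mod (n : Int) (w : Int) = ((n % w : Nat) : Int) := by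
        unfold PySem.Int.mod
        rw [Int.fmod_eq_emod, if_pos (Or.inl (by positivity)), add_zero, ← Int.natCast_mod]
      simp only [make_filler_text, make_filler_text_alt, if_neg hc, if_neg hwle,
        Int.toNat_natCast, hfd, hfm, ne_eq, Nat.cast_eq_zero]
      rw [pv_lines_eq token n w hwpos]
      have hifq : (if ¬ n / w = 0 then
            List.replicate (n / w) (PySem.Str.join " " (List.replicate w token)) else [])
          = List.replicate (n / w) (PySem.Str.join " " (List.replicate w token)) := by
        by_cases hq : n / w = 0 <;> simp [hq]
      rw [hifq]
      by_cases hr : n % w = 0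
      · simp [hr]
      · rw [if_pos hr, if_pos hr]
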